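-- pv_equiv track=rewrite | github.com/knosmos/advent-2023 | 14/14b.py | solve
-- ===== SOURCE A (Python) =====
-- def solve(row):
--     curr_offset = 0
--     r = 0
--     x = ""
--     for i in range(len(row)):
--         if row[i] == "#":
--             x += "." * (i - curr_offset)
--             curr_offset = i + 1
--             x += "#"
--         elif row[i] == "O":
--             r += len(row) - curr_offset
--             curr_offset += 1
--             x += "O"
--     # pad
--     x += "." * (len(row) - curr_offset)
--     return r, x
-- ===== SOURCE B (Python) =====
-- def solve(row):
--     segs = row.split('#')
--     x = '#'.join('O' * s.count('O') + '.' * (len(s) - s.count('O')) for s in segs)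
--     r = sum(len(row) - i for i, ch in enumerate(x) if ch == 'O')
--     return r, x
-- ===== Notes on version B (the rewrite author's own statement) =====
-- stated objective: simpler
-- what changed: A's fused single pass with index/offset bookkeeping is replaced by split-on-'#' segments rebuilt as 'O'*c+'.'*(len-c) joined back, with the load computed by a separate enumerate scan over the result.
import Mathlib
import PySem

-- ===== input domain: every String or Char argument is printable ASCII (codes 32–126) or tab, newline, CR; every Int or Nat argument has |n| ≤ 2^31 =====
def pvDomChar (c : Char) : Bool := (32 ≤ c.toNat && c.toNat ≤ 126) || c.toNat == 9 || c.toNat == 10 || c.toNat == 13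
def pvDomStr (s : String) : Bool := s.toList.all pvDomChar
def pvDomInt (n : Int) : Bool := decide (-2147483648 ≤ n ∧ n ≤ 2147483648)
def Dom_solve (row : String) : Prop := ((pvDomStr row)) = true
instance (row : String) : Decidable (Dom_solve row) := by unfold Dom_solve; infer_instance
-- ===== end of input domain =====

-- B replaces A's fused one-pass offset/load bookkeeping by split-on-'#' / rebuild-segments / join,
-- with the load computed in a separate enumerate pass (objective: simpler decomposition; same cost).

-- ===== PORT A =====
def solve (row : String) : Int × String :=
  let l := row.toList
  let n : Int := PySem.Chars.len l
  let fin := (PySem.List.pyRange 0 n).foldl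
    (fun (st : Int × Int × List Char) (i : Int) =>
      -- st = (curr_offset, r, x); row[i] is always in range since i ∈ range(len(row))
      let c := PySem.List.pyGetD l i '.'
      if c = '#' then (i + 1, st.2.1, st.2.2 ++ PySem.List.pyRepeat ['.'] (i - st.1) ++ ['#'])
      else if c = 'O' then (st.1 + 1, st.2.1 + (n - st.1), st.2.2 ++ ['O'])
      else st)
    ((0 : Int), (0 : Int), ([] : List Char))
  (fin.2.1, String.ofList (fin.2.2 ++ PySem.List.pyRepeat ['.'] (n - fin.1)))

-- ===== PORT B =====
-- 'O' * s.count('O') + '.' * (len(s) - s.count('O'))  for one '#'-free segment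
def packSeg (s : List Char) : List Char :=
  List.replicate (s.count 'O') 'O' ++ List.replicate (s.length - s.count 'O') '.'

def solve_alt (row : String) : Int × String :=
  let l := row.toList
  let n : Int := PySem.Chars.len l
  let segs := l.splitOn '#'          -- row.split('#'): exact for a one-char separator
  let x := PySem.Chars.join ['#'] (segs.map packSeg)
  let r := (PySem.List.enumerate x).foldl
    (fun (acc : Int) (p : Int × Char) => if p.2 = 'O' then acc + (n - p.1) else acc) 0
  (r, String.ofList x)

-- ===== PRECONDITION & SPEC =====
def Spec_solve (row : String) (out : Int × String) : Prop := out = solve_alt row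
instance (row : String) (out : Int × String) : Decidable (Spec_solve row out) := by unfold Spec_solve; infer_instance

-- ===== CLAIM (what is proved, stated in full; the proofs are below) =====
def Claim_equal_solve : Prop := ∀ (row : String), Dom_solve row → Spec_solve row (solve row)

-- ===== LEMMAS AND PROOFS =====

-- A's loop body, uncurried over (i, row[i])
def stepA (n : Int) (st : Int × Int × List Char) (p : Int × Char) : Int × Int × List Char :=
  if p.2 = '#' then (p.1 + 1, st.2.1, st.2.2 ++ PySem.List.pyRepeat ['.'] (p.1 - st.1) ++ ['#'])
  else if p.2 = 'O' then (st.1 + 1, st.2.1 + (n - st.1), st.2.2 ++ ['O'])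
  else st

-- packed form of the whole row (c,d = O's and fillers pending in the current segment), with trailing dots
def goF : List Char → Nat → Nat → List Char
  | [], c, d => List.replicate c 'O' ++ List.replicate d '.'
  | ch :: t, c, d =>
      if ch = '#' then List.replicate c 'O' ++ List.replicate d '.' ++ '#' :: goF t 0 0
      else if ch = 'O' then goF t (c + 1) d else goF t c (d + 1)

-- same, without the trailing dots of the last segment (= what A's loop has built before the pad)
def goT : List Char → Nat → Nat → List Char
  | [], c, _ => List.replicate c 'O'
  | ch :: t, c, d =>
      if ch = '#' then List.replicate c 'O' ++ List.replicate d '.' ++ '#' :: goT t 0 0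
      else if ch = 'O' then goT t (c + 1) d else goT t c (d + 1)

-- number of trailing dots of the last segment
def dEnd : List Char → Nat → Nat
  | [], d => d
  | ch :: t, d => if ch = '#' then dEnd t 0 else if ch = 'O' then dEnd t d else dEnd t (d + 1)

-- load of a packed row read from absolute position s
def loadFrom (n : Int) (s : Int) : List Char → Int
  | [] => 0
  | ch :: t => (if ch = 'O' then n - s else 0) + loadFrom n (s + 1) t

theorem goT_succ (l : List Char) : ∀ c d : Nat, goT l (c + 1) d = 'O' :: goT l c d := by
  induction l with
  | nil => intro c d; simp [goT, List.replicate_succ]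
  | cons ch t ih =>
      intro c d
      by_cases h1 : ch = '#'
      · simp [goT, h1, List.replicate_succ]
      · by_cases h2 : ch = 'O' <;> simp [goT, h1, h2, ih]

theorem goF_eq_goT (l : List Char) : ∀ c d : Nat, goF l c d = goT l c d ++ List.replicate (dEnd l d) '.' := by
  induction l with
  | nil => intro c d; simp [goF, goT, dEnd]
  | cons ch t ih =>
      intro c d
      by_cases h1 : ch = '#'
      · simp [goF, goT, dEnd, h1, ih]
      · by_cases h2 : ch = 'O' <;> simp [goF, goT, dEnd, h1, h2, ih]

theorem loadFrom_append_dots (n : Int) (k : Nat) :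
    ∀ (y : List Char) (s : Int), loadFrom n s (y ++ List.replicate k '.') = loadFrom n s y := by
  intro y
  induction y with
  | nil =>
      intro s
      induction k generalizing s with
      | zero => simp [loadFrom]
      | succ m ihm =>
          simp only [List.replicate_succ, List.nil_append, loadFrom,
            if_neg (by decide : ¬ ('.' : Char) = 'O')]
          simpa using ihm (s + 1)
  | cons ch t ih => intro s; simp [loadFrom, ih]

theorem loadFrom_dots_append (n : Int) (k : Nat) :
    ∀ (y : List Char) (s : Int), loadFrom n s (List.replicate k '.' ++ y) = loadFrom n (s + k) y := by
  induction k with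
  | zero => intro y s; simp
  | succ m ih =>
      intro y s
      rw [List.replicate_succ]
      simp only [List.cons_append, loadFrom, if_neg (by decide : ¬ ('.' : Char) = 'O')]
      rw [ih]
      push_cast
      ring_nf

-- B's enumerate fold computes loadFrom
theorem enumFold (n : Int) :
    ∀ (x : List Char) (s acc : Int),
      List.foldl (fun (a : Int) (p : Int × Char) => if p.2 = 'O' then a + (n - p.1) else a) acc
          (PySem.List.enumerate x s) = acc + loadFrom n s x := by
  intro x
  induction x with
  | nil => intro s acc; simp [PySem.List.enumerate_nil, loadFrom]
  | cons ch t ih =>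
      intro s acc
      rw [PySem.List.enumerate_cons]
      by_cases h : ch = 'O' <;> simp [loadFrom, h, ih] <;> ring

-- B's join-of-packed-segments, unfolded to head segment plus '#'-prefixed rest
theorem joinPack (h : List Char) :
    ∀ tl : List (List Char),
      PySem.Chars.join ['#'] ((h :: tl).map packSeg)
        = packSeg h ++ (tl.map (fun s => '#' :: packSeg s)).flatten := by
  intro tl
  induction tl generalizing h with
  | nil => simp [PySem.Chars.join_singleton]
  | cons b t ih =>
      simp only [List.map_cons] at *
      rw [PySem.Chars.join_cons_cons]
      simp [ih b, List.flatten_cons]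

theorem splitOn_hash_cons (l : List Char) :
    ∃ hd tl, l.splitOn '#' = hd :: tl := by
  rcases e : l.splitOn '#' with _ | ⟨hd, tl⟩
  · exact absurd e (List.splitOnP_ne_nil _ l)
  · exact ⟨hd, tl, rfl⟩

-- goF equals B's packed string, via the splitOn decomposition
theorem goF_splitOn :
    ∀ (l : List Char) (c d : Nat),
      goF l c d
        = List.replicate (c + ((l.splitOn '#').headI.count 'O')) 'O'
          ++ List.replicate (d + ((l.splitOn '#').headI.length - (l.splitOn '#').headI.count 'O')) '.'
          ++ (((l.splitOn '#').tail).map (fun s => '#' :: packSeg s)).flatten := by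
  intro l
  induction l with
  | nil =>
      intro c d
      rw [List.splitOn, List.splitOnP_nil]
      simp [goF]
  | cons ch t ih =>
      intro c d
      obtain ⟨h', tl', e'⟩ := splitOn_hash_cons t
      rw [List.splitOn, List.splitOnP_cons, ← List.splitOn]
      by_cases h1 : ch = '#'
      · subst h1
        rw [if_pos (by simp), e']
        simp only [goF, if_pos rfl, List.headI, List.tail_cons, List.map_cons,
          List.flatten_cons]
        rw [ih 0 0, e']
        simp [packSeg]
      · rw [if_neg (by simp [h1]), e']
        simp only [List.modifyHead, List.headI, List.tail_cons]
        have hle : h'.count 'O' ≤ h'.length := List.count_le_length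
        by_cases h2 : ch = 'O'
        · subst h2
          simp only [goF, if_neg (by decide : ¬ ('O' : Char) = '#'), if_pos rfl]
          rw [ih (c + 1) d, e']
          simp only [List.headI, List.tail_cons]
          have hc : List.count 'O' ('O' :: h') = List.count 'O' h' + 1 := by
            simp [List.count_cons]
          rw [hc]
          have e1 : c + (List.count 'O' h' + 1) = (c + 1) + List.count 'O' h' := by omega
          have e2 : ('O' :: h').length - (List.count 'O' h' + 1) = h'.length - List.count 'O' h' := by
            simp [List.length_cons]
          rw [e1, e2]
          simp
        · simp only [goF, if_neg h1, if_neg h2]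
          rw [ih c (d + 1), e']
          simp only [List.headI, List.tail_cons]
          have hc : List.count 'O' (ch :: h') = List.count 'O' h' := by
            simp [List.count_cons, h2]
          rw [hc]
          have e1 : (ch :: h').length - List.count 'O' h' = (h'.length - List.count 'O' h') + 1 := by
            simp [List.length_cons]; omega
          have e2 : d + ((h'.length - List.count 'O' h') + 1) = (d + 1) + (h'.length - List.count 'O' h') := by omega
          rw [e1, e2]

-- A's loop, run over the tail l from absolute index s with d pending fillers in the current
-- segment (so curr_offset = s - d), characterized in closed form
theorem A_run (n : Int) :
    ∀ (l : List Char) (s : Int) (d : Nat) (r : Int) (x : List Char),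
      List.foldl (stepA n) (s - (d : Int), r, x) (PySem.List.enumerate l s)
        = (s + l.length - dEnd l d, r + loadFrom n (s - (d : Int)) (goT l 0 d), x ++ goT l 0 d) := by
  intro l
  induction l with
  | nil =>
      intro s d r x
      simp [PySem.List.enumerate_nil, dEnd, goT, loadFrom]
  | cons ch t ih =>
      intro s d r x
      rw [PySem.List.enumerate_cons, List.foldl_cons]
      by_cases h1 : ch = '#'
      · subst h1
        have hstep : stepA n (s - (d : Int), r, x) (s, '#')
            = (s + 1, r, x ++ List.replicate d '.' ++ ['#']) := by
          simp [stepA, PySem.List.pyRepeat_singleton]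
        rw [hstep]
        have hih := ih (s + 1) 0 r (x ++ List.replicate d '.' ++ ['#'])
        simp only [Nat.cast_zero, sub_zero] at hih
        rw [hih]
        have hgoT : goT ('#' :: t) 0 d = List.replicate d '.' ++ '#' :: goT t 0 0 := by
          simp [goT]
        have hdE : dEnd ('#' :: t) d = dEnd t 0 := by simp [dEnd]
        rw [hgoT, hdE]
        refine Prod.ext ?_ (Prod.ext ?_ ?_)
        · push_cast [List.length_cons]; ring
        · simp only
          rw [loadFrom_dots_append]
          have hsd : s - (d : Int) + d = s := by ring
          rw [hsd]
          simp only [loadFrom, if_neg (by decide : ¬ ('#' : Char) = 'O')]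
          ring
        · simp [List.append_assoc]
      · by_cases h2 : ch = 'O'
        · subst h2
          have hstep : stepA n (s - (d : Int), r, x) (s, 'O')
              = (s - (d : Int) + 1, r + (n - (s - (d : Int))), x ++ ['O']) := by
            simp [stepA]
          rw [hstep]
          have hih := ih (s + 1) d (r + (n - (s - (d : Int)))) (x ++ ['O'])
          have h0 : (s + 1) - (d : Int) = s - (d : Int) + 1 := by ring
          rw [h0] at hih
          rw [hih]
          have hgoT : goT ('O' :: t) 0 d = 'O' :: goT t 0 d := by
            simp [goT, goT_succ t 0 d]
          have hdE : dEnd ('O' :: t) d = dEnd t d := by simp [dEnd]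
          rw [hgoT, hdE]
          refine Prod.ext ?_ (Prod.ext ?_ ?_)
          · push_cast [List.length_cons]; ring
          · simp only [loadFrom, if_true, eq_self_iff_true]
            ring
          · simp [List.append_assoc]
        · have hstep : stepA n (s - (d : Int), r, x) (s, ch) = (s - (d : Int), r, x) := by
            simp [stepA, h1, h2]
          rw [hstep]
          have hih := ih (s + 1) (d + 1) r x
          have h0 : (s + 1) - ((d + 1 : Nat) : Int) = s - (d : Int) := by push_cast; ring
          rw [h0] at hih
          rw [hih]
          have hgoT : goT (ch :: t) 0 d = goT t 0 (d + 1) := by simp [goT, h1, h2]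
          have hdE : dEnd (ch :: t) d = dEnd t (d + 1) := by simp [dEnd, h1, h2]
          rw [hgoT, hdE]
          refine Prod.ext ?_ (Prod.ext ?_ ?_)
          · push_cast [List.length_cons]; ring
          · rfl
          · rfl

-- ===== VERDICT (by name: the statement is the Claim_ definition above) =====
theorem solve_spec : Claim_equal_solve := by
  intro row _
  unfold Spec_solve
  show solve row = solve_alt row
  unfold solve solve_alt
  simp only [PySem.Chars.len_eq]
  set l := row.toList with hl
  set n : Int := (l.length : Int) with hn
  -- A's indexed loop over range(len(row)) is the fold of stepA over enumerate l
  have hmap : PySem.List.enumerate l 0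
      = (PySem.List.pyRange 0 n).map (fun j => (j, PySem.List.pyGetD l j '.')) := by
    have h := PySem.List.enumerate_eq_map_pyRange l '.'
    simpa [PySem.List.len, hn] using h
  have hfoldA :
      (PySem.List.pyRange 0 n).foldl
        (fun (st : Int × Int × List Char) (i : Int) =>
          let c := PySem.List.pyGetD l i '.'
          if c = '#' then (i + 1, st.2.1, st.2.2 ++ PySem.List.pyRepeat ['.'] (i - st.1) ++ ['#'])
          else if c = 'O' then (st.1 + 1, st.2.1 + (n - st.1), st.2.2 ++ ['O'])
          else st)
        ((0 : Int), (0 : Int), ([] : List Char))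
      = List.foldl (stepA n) ((0 : Int), (0 : Int), ([] : List Char)) (PySem.List.enumerate l 0) := by
    rw [hmap, List.foldl_map]
    rfl
  have hrun := A_run n l 0 0 0 []
  simp only [Nat.cast_zero, sub_zero, zero_sub, neg_zero, zero_add, List.nil_append] at hrun
  rw [hfoldA, hrun]
  -- the state after the loop, then the pad
  have hpad : PySem.List.pyRepeat ['.'] (n - ((l.length : Int) - (dEnd l 0 : Int)))
      = List.replicate (dEnd l 0) '.' := by
    rw [PySem.List.pyRepeat_singleton]
    have h9 : n - ((l.length : Int) - (dEnd l 0 : Int)) = (dEnd l 0 : Int) := by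
      rw [hn]; ring
    rw [h9, Int.toNat_natCast]
  -- B's string is goF l 0 0
  obtain ⟨hd, tl, e⟩ := splitOn_hash_cons l
  have hx : PySem.Chars.join ['#'] ((l.splitOn '#').map packSeg) = goF l 0 0 := by
    rw [e, joinPack, goF_splitOn l 0 0, e]
    simp [packSeg]
  -- assemble both sides
  have hgoF : goF l 0 0 = goT l 0 0 ++ List.replicate (dEnd l 0) '.' := goF_eq_goT l 0 0
  have hloadT : loadFrom n 0 (goT l 0 0) = loadFrom n 0 (goF l 0 0) := by
    rw [hgoF, loadFrom_append_dots]
  refine Prod.ext ?_ ?_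
  · simp only
    rw [enumFold, hx, hloadT]
    ring
  · simp only
    rw [hpad, hx, hgoF]
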